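-- pv_equiv track=rewrite | github.com/jaanos/operacijske-raziskave | vaje/vaje5.py | plakati
-- ===== SOURCE A (Python) =====
-- def plakati(x, v, d):
--     """
--     Optimalna postavitev plakatov na mestih iz urejenega seznama x
--     z donosnostmi iz seznama v, če morata biti dva plakata na razdalji vsaj d.
--
--     Časovna zahtevnost: O(n),
--     kjer je n dolžina seznamov x in v.
--     """
--     n = len(x)
--     assert n == len(v)
--     assert all(x[i-1] < x[i] for i in range(1, n))
--     j = 0
--     s = []
--     for i, xi in enumerate(x):
--         while xi - x[j] >= d:
--             j += 1
--         if j == 0: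
--             p = 0
--             r = None
--         else:
--             p = s[j-1][0]
--             r = j - 1
--         p += v[i]
--         if i > 0 and p < s[i-1][0]:
--             p = s[i-1][0]
--             r = i - 1
--             b = False
--         else:
--             b = True
--         s.append((p, r, b))
--     p, r, b = s[-1]
--     l = []
--     if b:
--         l.append(n - 1)
--     while r is not None:
--         c = r
--         _, r, b = s[r]
--         if b:
--             l.append(c)
--     return (p, list(reversed(l)))
-- ===== SOURCE B (Python) =====
-- def bisect_right(a, t):
--     lo, hi = 0, len(a)
--     while lo < hi:
--         m = (lo + hi) // 2
--         if a[m] <= t: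
--             lo = m + 1
--         else:
--             hi = m
--     return lo
--
-- def plakati(x, v, d):
--     """
--     Optimalna postavitev plakatov: dp over plain values, with the reachable
--     predecessor found by binary search, and the chosen set reconstructed
--     backwards by recomputation instead of stored back-pointers.
--     """
--     n = len(x)
--     assert n == len(v)
--     assert all(x[i-1] < x[i] for i in range(1, n))
--     dp = []
--     for i, xi in enumerate(x):
--         comp = bisect_right(x, xi - d)
--         place = v[i] + (dp[comp - 1] if comp > 0 else 0)
--         if i > 0 and place < dp[i - 1]:
--             dp.append(dp[i - 1])
--         else:
--             dp.append(place)
--     sel = []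
--     i = n - 1
--     while i >= 0:
--         comp = bisect_right(x, x[i] - d)
--         place = v[i] + (dp[comp - 1] if comp > 0 else 0)
--         if i == 0 or place >= dp[i - 1]:
--             sel.append(i)
--             i = comp - 1
--         else:
--             i -= 1
--     return (dp[-1], list(reversed(sel)))
-- ===== Notes on version B (the rewrite author's own statement) =====
-- stated objective: alternative
-- what changed: Replaces A's bundled (value, back-pointer, placed-flag) tuple list and incremental two-pointer scan by a plain value-only dp array whose predecessor index is found by binary search, with the chosen posters reconstructed backwards by recomputing each decision instead of following stored back-pointers.
import Mathlib
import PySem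

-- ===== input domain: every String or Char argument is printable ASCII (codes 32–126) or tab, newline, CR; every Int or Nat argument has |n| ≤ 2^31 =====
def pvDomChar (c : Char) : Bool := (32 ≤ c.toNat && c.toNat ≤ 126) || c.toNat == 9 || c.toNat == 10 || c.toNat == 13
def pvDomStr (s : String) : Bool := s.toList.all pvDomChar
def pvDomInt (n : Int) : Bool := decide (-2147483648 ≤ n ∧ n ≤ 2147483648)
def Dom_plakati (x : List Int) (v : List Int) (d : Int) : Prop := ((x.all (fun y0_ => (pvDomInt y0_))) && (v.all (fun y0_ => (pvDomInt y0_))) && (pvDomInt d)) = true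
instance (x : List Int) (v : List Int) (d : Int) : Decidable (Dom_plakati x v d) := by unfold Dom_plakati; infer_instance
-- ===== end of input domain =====

-- B replaces A's bundled (value, back-pointer, placed) tuple DP and pointer chain by a plain
-- value-only dp array (predecessor found by binary search) with a recomputing backward
-- reconstruction; equal return values on Pre_ (no argument is mutated by either version).

-- ===== PORT A =====
-- the inner `while xi - x[j] >= d: j += 1`; fuel x.length + 1 suffices under Pre_
-- (j never passes the current position i < x.length)
def advA (x : List Int) (d xi : Int) : Nat → Nat → Nat
  | 0, j => j
  | f+1, j => if d ≤ xi - x.getD j 0 then advA x d xi f (j+1) else j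

-- body of `for i, xi in enumerate(x)`; state = (j, s), s holds the (p, r, b) tuples
def stepA (x v : List Int) (d : Int) (st : Nat × List (Int × Option Int × Bool))
    (ix : Int × Int) : Nat × List (Int × Option Int × Bool) :=
  let i := ix.1
  let xi := ix.2
  let j := advA x d xi (x.length + 1) st.1
  let s := st.2
  let pr : Int × Option Int :=
    if j = 0 then (0, none) else ((s.getD (j-1) (0, none, false)).1, some ((j : Int) - 1))
  let p := pr.1 + v.getD i.toNat 0
  let prb : Int × Option Int × Bool :=
    if 0 < i ∧ p < (s.getD (i.toNat - 1) (0, none, false)).1 then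
      ((s.getD (i.toNat - 1) (0, none, false)).1, some (i - 1), false)
    else (p, pr.2, true)
  (j, s ++ [prb])

-- `while r is not None: …`; fuel x.length suffices (the stored pointers strictly decrease)
def walkA (s : List (Int × Option Int × Bool)) : Nat → Option Int → List Int → List Int
  | 0, _, l => l
  | f+1, r, l =>
    match r with
    | none => l
    | some c =>
        let e := s.getD c.toNat (0, none, false)
        walkA s f e.2.1 (if e.2.2 then l ++ [c] else l)

def plakati (x : List Int) (v : List Int) (d : Int) : Int × List Int :=
  let st := (PySem.List.enumerate x).foldl (stepA x v d) (0, [])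
  let s := st.2
  let e := s.getD (s.length - 1) (0, none, false)   -- s[-1] (Pre_ gives s ≠ [])
  let l : List Int := if e.2.2 then [(x.length : Int) - 1] else []
  (e.1, (walkA s x.length e.2.1 l).reverse)

-- ===== PORT B =====
-- Source B's hand-written bisect_right, ported with fuel x.length (hi - lo shrinks every round)
def bisectR (a : List Int) (t : Int) : Nat → Nat → Nat → Nat
  | 0, lo, _ => lo
  | f+1, lo, hi =>
    if lo < hi then
      let m := (lo + hi) / 2
      if a.getD m 0 ≤ t then bisectR a t f (m+1) hi else bisectR a t f lo m
    else lo

-- body of `for i, xi in enumerate(x)` building the plain dp array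
def stepB (x v : List Int) (d : Int) (dp : List Int) (ix : Int × Int) : List Int :=
  let i := ix.1
  let xi := ix.2
  let comp := bisectR x (xi - d) x.length 0 x.length
  let place := v.getD i.toNat 0 + (if 0 < comp then dp.getD (comp - 1) 0 else 0)
  if 0 < i ∧ place < dp.getD (i.toNat - 1) 0 then dp ++ [dp.getD (i.toNat - 1) 0]
  else dp ++ [place]

-- `while i >= 0: …`; fuel x.length + 1 suffices (i strictly decreases)
def walkB (x v dp : List Int) (d : Int) : Nat → Int → List Int → List Int
  | 0, _, sel => sel
  | f+1, i, sel =>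
    if 0 ≤ i then
      let comp := bisectR x (x.getD i.toNat 0 - d) x.length 0 x.length
      let place := v.getD i.toNat 0 + (if 0 < comp then dp.getD (comp - 1) 0 else 0)
      if i = 0 ∨ dp.getD (i.toNat - 1) 0 ≤ place then
        walkB x v dp d f ((comp : Int) - 1) (sel ++ [i])
      else walkB x v dp d f (i - 1) sel
    else sel

def plakati_alt (x : List Int) (v : List Int) (d : Int) : Int × List Int :=
  let dp := (PySem.List.enumerate x).foldl (stepB x v d) []
  let sel := walkB x v dp d (x.length + 1) ((x.length : Int) - 1) []
  (dp.getD (dp.length - 1) 0, sel.reverse)   -- dp[-1] (Pre_ gives dp ≠ [])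

-- ===== PRECONDITION & SPEC =====
-- Pre_ excludes exactly the inputs where A raises: mismatched lengths or a non-strictly-
-- increasing x (AssertionError), empty x (IndexError on s[-1]), and d ≤ 0 (IndexError:
-- the scan pointer j overruns before any tuple is stored).
def Pre_plakati (x : List Int) (v : List Int) (d : Int) : Prop :=
  x.length = v.length ∧ x ≠ [] ∧ 1 ≤ d ∧ x.Pairwise (· < ·)
instance (x : List Int) (v : List Int) (d : Int) : Decidable (Pre_plakati x v d) := by
  unfold Pre_plakati; infer_instance

def pvWitness_plakati : List Int × List Int × Int := ([0, 2, 4, 6], [3, 7, 2, 9], 3)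

def Spec_plakati (x : List Int) (v : List Int) (d : Int) (out : Int × List Int) : Prop := out = plakati_alt x v d
instance (x : List Int) (v : List Int) (d : Int) (out : Int × List Int) : Decidable (Spec_plakati x v d out) := by unfold Spec_plakati; infer_instance

-- ===== CLAIM (what is proved, stated in full; the proofs are below) =====
def Claim_equal_plakati : Prop := ∀ (x : List Int) (v : List Int) (d : Int), Dom_plakati x v d → Pre_plakati x v d → Spec_plakati x v d (plakati x v d)

-- ===== LEMMAS AND PROOFS =====

-- number of positions k with x[k] <= x[i] - d (what A's pointer j reaches and B's bisect returns)
def cnt (x : List Int) (d : Int) (i : Nat) : Nat :=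
  x.countP (fun t => decide (t ≤ x.getD i 0 - d))

def placeD (x v dp : List Int) (d : Int) (k : Nat) : Int :=
  v.getD k 0 + (if 0 < cnt x d k then dp.getD (cnt x d k - 1) 0 else 0)

def bdef (x v dp : List Int) (d : Int) (k : Nat) : Bool :=
  !(decide (0 < k ∧ placeD x v dp d k < dp.getD (k - 1) 0))

def rdef (x v dp : List Int) (d : Int) (k : Nat) : Option Int :=
  if bdef x v dp d k then
    (if cnt x d k = 0 then none else some ((cnt x d k : Int) - 1))
  else some ((k : Int) - 1)

-- A's tuple list and B's dp array agree entrywise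
def RelS (x v : List Int) (d : Int) (k : Nat) (s : List (Int × Option Int × Bool)) (dp : List Int) : Prop :=
  s.length = k ∧ dp.length = k ∧
  ∀ k' < k, s.getD k' (0, none, false) = (dp.getD k' 0, rdef x v dp d k', bdef x v dp d k')

lemma sorted_getD_le_iff (x : List Int) (c : Int) (hs : x.Pairwise (· < ·))
    (j : Nat) (hj : j < x.length) :
    x.getD j 0 ≤ c ↔ j < x.countP (fun t => decide (t ≤ c)) := by
  induction x generalizing j with
  | nil => simp at hj
  | cons h t ih =>
    rw [List.pairwise_cons] at hs
    obtain ⟨hall, ht⟩ := hs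
    rw [List.countP_cons]
    cases j with
    | zero =>
      simp only [List.getD_cons_zero]
      by_cases hc : h ≤ c
      · simp [hc]
      · have hz : t.countP (fun t => decide (t ≤ c)) = 0 := by
          rw [List.countP_eq_zero]
          intro y hy
          simp only [decide_eq_true_eq]
          have := hall y hy
          omega
        simp [hc, hz]
    | succ j =>
      simp only [List.getD_cons_succ]
      simp only [List.length_cons] at hj
      have hj' : j < t.length := by omega
      rw [ih ht j hj']
      by_cases hc : h ≤ c
      · simp only [hc, decide_true, if_true]
        omega
      · have hz : t.countP (fun t => decide (t ≤ c)) = 0 := by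
          rw [List.countP_eq_zero]
          intro y hy
          simp only [decide_eq_true_eq]
          have := hall y hy
          omega
        simp [hc, hz]

lemma cnt_le (x : List Int) (d : Int) (hs : x.Pairwise (· < ·)) (hd : 1 ≤ d)
    (k : Nat) (hk : k < x.length) : cnt x d k ≤ k := by
  by_contra hlt
  have := (sorted_getD_le_iff x (x.getD k 0 - d) hs k hk).mpr (by unfold cnt at hlt; omega)
  omega

lemma cnt_mono (x : List Int) (d : Int) (hs : x.Pairwise (· < ·))
    (k k' : Nat) (hkk : k ≤ k') (hk' : k' < x.length) : cnt x d k ≤ cnt x d k' := by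
  apply List.countP_mono_left
  intro a _
  simp only [decide_eq_true_eq]
  intro hle
  have hgd : x.getD k 0 ≤ x.getD k' 0 := by
    rcases Nat.lt_or_ge k k' with h | h
    · have hk : k < x.length := by omega
      rw [List.getD_eq_getElem x 0 hk, List.getD_eq_getElem x 0 hk']
      exact le_of_lt (List.pairwise_iff_getElem.mp hs k k' hk hk' h)
    · have : k = k' := by omega
      subst this; rfl
  omega

lemma countP_le_len (x : List Int) (c : Int) :
    x.countP (fun t => decide (t ≤ c)) ≤ x.length := List.countP_le_length

lemma bisectR_eq (x : List Int) (c : Int) (hs : x.Pairwise (· < ·)) :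
    ∀ (f lo hi : Nat), hi - lo ≤ f → lo ≤ x.countP (fun t => decide (t ≤ c)) →
      x.countP (fun t => decide (t ≤ c)) ≤ hi → hi ≤ x.length →
      bisectR x c f lo hi = x.countP (fun t => decide (t ≤ c)) := by
  intro f
  induction f with
  | zero => intro lo hi h1 h2 h3 h4; simp only [bisectR]; omega
  | succ f ih =>
    intro lo hi h1 h2 h3 h4
    simp only [bisectR]
    by_cases hlh : lo < hi
    · rw [if_pos hlh]
      have hm1 : lo ≤ (lo + hi) / 2 := by omega
      have hm2 : (lo + hi) / 2 < hi := by omega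
      have hmn : (lo + hi) / 2 < x.length := by omega
      by_cases hc : x.getD ((lo + hi) / 2) 0 ≤ c
      · rw [if_pos hc]
        have := (sorted_getD_le_iff x c hs _ hmn).mp hc
        exact ih _ _ (by omega) (by omega) h3 h4
      · rw [if_neg hc]
        have : ¬ ((lo + hi) / 2 < x.countP (fun t => decide (t ≤ c))) := by
          intro hlt
          exact hc ((sorted_getD_le_iff x c hs _ hmn).mpr hlt)
        exact ih _ _ (by omega) h2 (by omega) (by omega)
    · rw [if_neg hlh]; omega

lemma bisectR_cnt (x : List Int) (d : Int) (hs : x.Pairwise (· < ·)) (i : Nat) :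
    bisectR x (x.getD i 0 - d) x.length 0 x.length = cnt x d i := by
  exact bisectR_eq x _ hs x.length 0 x.length (by omega) (by omega)
    (countP_le_len x _) (le_refl _)

lemma advA_eq (x : List Int) (d : Int) (hs : x.Pairwise (· < ·)) (hd : 1 ≤ d) (i : Nat) (hi : i < x.length) :
    ∀ (f j : Nat), j ≤ cnt x d i → cnt x d i - j ≤ f →
      advA x d (x.getD i 0) f j = cnt x d i := by
  have hci : cnt x d i ≤ x.length := countP_le_len x _
  intro f
  induction f with
  | zero => intro j h1 h2; simp only [advA]; omega
  | succ f ih =>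
    intro j h1 h2
    simp only [advA]
    by_cases hj : j < cnt x d i
    · have hjn : j < x.length := by omega
      have hle := (sorted_getD_le_iff x (x.getD i 0 - d) hs j hjn).mpr hj
      rw [if_pos (by omega)]
      exact ih (j+1) (by omega) (by omega)
    · have hje : j = cnt x d i := by omega
      have : ¬ (d ≤ x.getD i 0 - x.getD j 0) := by
        intro hcond
        rcases Nat.lt_or_ge j x.length with hjn | hjn
        · have harg : x.getD j 0 ≤ x.getD i 0 - d := by omega
          have hlt := (sorted_getD_le_iff x (x.getD i 0 - d) hs j hjn).mp harg
          have hje' : j = x.countP (fun t => decide (t ≤ x.getD i 0 - d)) := hje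
          omega
        · rw [List.getD_eq_default x 0 hjn] at hcond
          have hje' : j = x.countP (fun t => decide (t ≤ x.getD i 0 - d)) := hje
          have hii := (sorted_getD_le_iff x (x.getD i 0 - d) hs i hi).mpr (by omega)
          omega
      rw [if_neg this, hje]

lemma getD_app_lt {α : Type} (l : List α) (w dflt : α) (m : Nat) (hm : m < l.length) :
    (l ++ [w]).getD m dflt = l.getD m dflt := by
  rw [List.getD_eq_getElem _ _ (by simp; omega), List.getD_eq_getElem _ _ hm]
  exact List.getElem_append_left hm

lemma getD_app_last {α : Type} (l : List α) (w dflt : α) :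
    (l ++ [w]).getD l.length dflt = w := by
  rw [List.getD_eq_getElem _ _ (by simp)]
  simp

lemma placeD_app (x v dp : List Int) (d : Int) (k' : Nat) (w : Int)
    (hc : cnt x d k' ≤ k') (hk' : k' ≤ dp.length) :
    placeD x v (dp ++ [w]) d k' = placeD x v dp d k' := by
  unfold placeD
  by_cases h0 : 0 < cnt x d k'
  · rw [if_pos h0, if_pos h0, getD_app_lt _ _ _ _ (by omega)]
  · rw [if_neg h0, if_neg h0]

lemma bdef_app (x v dp : List Int) (d : Int) (k' : Nat) (w : Int)
    (hc : cnt x d k' ≤ k') (hk' : k' ≤ dp.length) :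
    bdef x v (dp ++ [w]) d k' = bdef x v dp d k' := by
  unfold bdef
  by_cases h0 : 0 < k'
  · rw [placeD_app x v dp d k' w hc hk', getD_app_lt _ _ _ _ (by omega)]
  · have hk0 : k' = 0 := by omega
    subst hk0; simp

lemma rdef_app (x v dp : List Int) (d : Int) (k' : Nat) (w : Int)
    (hc : cnt x d k' ≤ k') (hk' : k' ≤ dp.length) :
    rdef x v (dp ++ [w]) d k' = rdef x v dp d k' := by
  unfold rdef
  rw [bdef_app x v dp d k' w hc hk']

lemma getD_app_last_len {α : Type} (l : List α) (w dflt : α) {k : Nat} (hl : l.length = k) :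
    (l ++ [w]).getD k dflt = w := by
  subst hl; exact getD_app_last l w dflt

lemma relS_extend (x v : List Int) (d : Int) (k : Nat) (s : List (Int × Option Int × Bool))
    (dp : List Int) (w : Int) (e : Int × Option Int × Bool)
    (hk : k < x.length) (h : RelS x v d k s dp) (hs : x.Pairwise (· < ·)) (hd : 1 ≤ d)
    (he : e = ((dp ++ [w]).getD k 0, rdef x v (dp ++ [w]) d k, bdef x v (dp ++ [w]) d k)) :
    RelS x v d (k+1) (s ++ [e]) (dp ++ [w]) := by
  obtain ⟨hsl, hdl, hent⟩ := h
  refine ⟨by simp [hsl], by simp [hdl], ?_⟩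
  intro k' hk'
  rcases Nat.lt_or_ge k' k with hlt | hge
  · have hkx : k' < x.length := by omega
    have hc : cnt x d k' ≤ k' := cnt_le x d hs hd k' hkx
    rw [getD_app_lt _ _ _ _ (by omega), getD_app_lt _ _ _ _ (by omega),
        rdef_app x v dp d k' w hc (by omega), bdef_app x v dp d k' w hc (by omega)]
    exact hent k' hlt
  · have : k' = k := by omega
    subst this
    rw [getD_app_last_len _ _ _ hsl, he]

lemma step_rel (x v : List Int) (d : Int) (hs : x.Pairwise (· < ·)) (hd : 1 ≤ d)
    (k : Nat) (hk : k < x.length) (s : List (Int × Option Int × Bool)) (dp : List Int)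
    (h : RelS x v d k s dp) (j : Nat) (hj : j = if k = 0 then 0 else cnt x d (k-1)) :
    (stepA x v d (j, s) ((k : Int), x.getD k 0)).1 = cnt x d k ∧
    RelS x v d (k+1) (stepA x v d (j, s) ((k : Int), x.getD k 0)).2
      (stepB x v d dp ((k : Int), x.getD k 0)) := by
  obtain ⟨hsl, hdl, hent⟩ := h
  have hck : cnt x d k ≤ k := cnt_le x d hs hd k hk
  have hcl : cnt x d k ≤ x.length := countP_le_len x _
  have hadv : advA x d (x.getD k 0) (x.length + 1) j = cnt x d k := by
    apply advA_eq x d hs hd k hk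
    · rcases Nat.eq_zero_or_pos k with h0 | hpos
      · subst h0; rw [hj]; simp
      · rw [hj, if_neg (by omega)]
        exact cnt_mono x d hs (k-1) k (by omega) hk
    · omega
  have hbis : bisectR x (x.getD k 0 - d) x.length 0 x.length = cnt x d k := bisectR_cnt x d hs k
  simp only [stepA, stepB, hadv, hbis, Int.toNat_natCast]
  refine ⟨trivial, ?_⟩
  have hsp : (if cnt x d k = 0 then ((0:Int), (none : Option Int))
      else ((s.getD (cnt x d k - 1) (0, none, false)).1, some ((cnt x d k : Int) - 1))).1
      + v.getD k 0 = placeD x v dp d k := by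
    unfold placeD
    rcases Nat.eq_zero_or_pos (cnt x d k) with h0 | h0
    · rw [h0]; simp [add_comm]
    · rw [if_neg (by omega), if_pos h0, hent (cnt x d k - 1) (by omega)]
      simp [add_comm]
  rw [hsp]
  rw [show v.getD k 0 + (if 0 < cnt x d k then dp.getD (cnt x d k - 1) 0 else 0)
        = placeD x v dp d k from rfl]
  rcases Nat.eq_zero_or_pos k with hk0 | hkpos
  · subst hk0
    have hc0 : cnt x d 0 = 0 := by omega
    have hfalse : ∀ (P : Prop), ¬((0:Int) < ((0:Nat):Int) ∧ P) :=
      fun P h => absurd h.1 (by norm_num)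
    rw [if_pos hc0, if_neg (hfalse _), if_neg (hfalse _)]
    apply relS_extend x v d 0 s dp _ _ hk ⟨hsl, hdl, hent⟩ hs hd
    rw [getD_app_last_len _ _ _ hdl]
    unfold rdef bdef
    simp [hc0]
  · rw [hent (k-1) (by omega)]
    rw [show ((dp.getD (k-1) 0, rdef x v dp d (k-1), bdef x v dp d (k-1)) :
          Int × Option Int × Bool).1 = dp.getD (k-1) 0 from rfl]
    have hcast : (0 : Int) < (k : Int) := by exact_mod_cast hkpos
    have hbapp : ∀ w, bdef x v (dp ++ [w]) d k = bdef x v dp d k := fun w =>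
      bdef_app x v dp d k w hck (by omega)
    have hrapp : ∀ w, rdef x v (dp ++ [w]) d k = rdef x v dp d k := fun w =>
      rdef_app x v dp d k w hck (by omega)
    by_cases h1 : 0 < (k:Int) ∧ placeD x v dp d k < dp.getD (k-1) 0
    · rw [if_pos h1, if_pos h1]
      apply relS_extend x v d k s dp _ _ hk ⟨hsl, hdl, hent⟩ hs hd
      rw [getD_app_last_len _ _ _ hdl, hbapp, hrapp]
      have hb : bdef x v dp d k = false := by
        unfold bdef
        rw [decide_eq_true (show 0 < k ∧ placeD x v dp d k < dp.getD (k-1) 0 from ⟨hkpos, h1.2⟩)]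
        rfl
      unfold rdef
      simp [hb]
    · rw [if_neg h1, if_neg h1]
      apply relS_extend x v d k s dp _ _ hk ⟨hsl, hdl, hent⟩ hs hd
      rw [getD_app_last_len _ _ _ hdl, hbapp, hrapp]
      have hnlt : ¬ (placeD x v dp d k < dp.getD (k-1) 0) := fun hlt => h1 ⟨hcast, hlt⟩
      have hb : bdef x v dp d k = true := by
        unfold bdef
        rw [decide_eq_false (by rintro ⟨-, hlt⟩; exact hnlt hlt :
          ¬ (0 < k ∧ placeD x v dp d k < dp.getD (k-1) 0))]
        rfl
      unfold rdef
      by_cases hc0 : cnt x d k = 0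
      · simp [hb, hc0]
      · simp [hb, hc0]

lemma fold_rel (x v : List Int) (d : Int) (hs : x.Pairwise (· < ·)) (hd : 1 ≤ d) :
    ∀ (m k : Nat) (j : Nat) (s : List (Int × Option Int × Bool)) (dp : List Int),
      k + m = x.length → RelS x v d k s dp → (j = if k = 0 then 0 else cnt x d (k-1)) →
      RelS x v d x.length
        (((PySem.List.enumerate x).drop k |>.foldl (stepA x v d) (j, s)).2)
        ((PySem.List.enumerate x).drop k |>.foldl (stepB x v d) dp) := by
  intro m
  induction m with
  | zero =>
    intro k j s dp hkm hrel hj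
    rw [List.drop_eq_nil_of_le (by rw [PySem.List.length_enumerate]; omega)]
    simpa using (by omega : k = x.length) ▸ hrel
  | succ m ih =>
    intro k j s dp hkm hrel hj
    have hk : k < x.length := by omega
    have hdrop : (PySem.List.enumerate x).drop k
        = ((k : Int), x.getD k 0) :: (PySem.List.enumerate x).drop (k+1) := by
      rw [List.drop_eq_getElem_cons (by rw [PySem.List.length_enumerate]; omega)]
      congr 1
      rw [PySem.List.getElem_enumerate]
      rw [List.getD_eq_getElem x 0 hk]
      simp
    rw [hdrop, List.foldl_cons, List.foldl_cons]
    obtain ⟨h1, h2⟩ := step_rel x v d hs hd k hk s dp hrel j hj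
    refine ih (k+1) _ _ _ (by omega) h2 ?_
    show (stepA x v d (j, s) ((k:Int), x.getD k 0)).1 = _
    rw [h1, if_neg (Nat.succ_ne_zero k), Nat.add_sub_cancel]

lemma walk_rel (x v : List Int) (d : Int) (hs : x.Pairwise (· < ·)) (hd : 1 ≤ d)
    (s : List (Int × Option Int × Bool)) (dp : List Int)
    (hrel : RelS x v d x.length s dp) :
    ∀ (f : Nat) (r : Option Int) (acc : List Int),
      (∀ c, r = some c → 0 ≤ c ∧ c.toNat < x.length) →
      walkA s f r acc =
        walkB x v dp d f (match r with | none => -1 | some c => c) acc := by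
  obtain ⟨hsl, hdl, hent⟩ := hrel
  intro f
  induction f with
  | zero => intro r acc hv; cases r <;> simp [walkA, walkB]
  | succ f ih =>
    intro r acc hv
    cases r with
    | none => simp [walkA, walkB]
    | some c =>
      obtain ⟨hc0, hcn⟩ := hv c rfl
      have he := hent c.toNat hcn
      have hcnt : cnt x d c.toNat ≤ c.toNat := cnt_le x d hs hd c.toNat hcn
      simp only [walkA, walkB, he, if_pos hc0]
      rw [bisectR_cnt x d hs c.toNat]
      rw [show v.getD c.toNat 0 + (if 0 < cnt x d c.toNat then dp.getD (cnt x d c.toNat - 1) 0 else 0)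
            = placeD x v dp d c.toNat from rfl]
      by_cases hb : bdef x v dp d c.toNat = true
      · have hcond : c = 0 ∨ dp.getD (c.toNat - 1) 0 ≤ placeD x v dp d c.toNat := by
          unfold bdef at hb
          simp only [Bool.not_eq_true', decide_eq_false_iff_not] at hb
          by_cases hz : c.toNat = 0
          · left; omega
          · right
            by_contra hlt
            exact hb ⟨by omega, by omega⟩
        rw [if_pos hcond]
        have hrd : rdef x v dp d c.toNat
            = (if cnt x d c.toNat = 0 then none else some ((cnt x d c.toNat : Int) - 1)) := by
          unfold rdef; rw [hb]; simp
        simp only [hb, if_true, hrd]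
        by_cases hz : cnt x d c.toNat = 0
        · rw [if_pos hz]
          have := ih none (acc ++ [c]) (by intro c' h; cases h)
          simpa [hz] using this
        · rw [if_neg hz]
          have hval : ∀ c', some ((cnt x d c.toNat : Int) - 1) = some c' → 0 ≤ c' ∧ c'.toNat < x.length := by
            intro c' hh; injection hh with hh; subst hh
            constructor
            · omega
            · have : ((cnt x d c.toNat : Int) - 1).toNat = cnt x d c.toNat - 1 := by omega
              omega
          have := ih (some ((cnt x d c.toNat : Int) - 1)) (acc ++ [c]) hval
          simpa using this
      · have hbf : bdef x v dp d c.toNat = false := by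
          cases hbb : bdef x v dp d c.toNat
          · rfl
          · exact absurd hbb hb
        have hhyp : 0 < c.toNat ∧ placeD x v dp d c.toNat < dp.getD (c.toNat - 1) 0 := by
          unfold bdef at hbf
          simp only [Bool.not_eq_false', decide_eq_true_eq] at hbf
          exact hbf
        have hcond : ¬ (c = 0 ∨ dp.getD (c.toNat - 1) 0 ≤ placeD x v dp d c.toNat) := by
          rintro (h0 | hle)
          · subst h0; simp at hhyp
          · omega
        rw [if_neg hcond]
        have hrd : rdef x v dp d c.toNat = some ((c.toNat : Int) - 1) := by
          unfold rdef; rw [hbf]; simp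
        simp only [hbf, Bool.false_eq_true, if_false, hrd]
        have hval : ∀ c', some ((c.toNat : Int) - 1) = some c' → 0 ≤ c' ∧ c'.toNat < x.length := by
          intro c' hh; injection hh with hh; subst hh
          constructor
          · omega
          · have : ((c.toNat : Int) - 1).toNat = c.toNat - 1 := by omega
            omega
        have := ih (some ((c.toNat : Int) - 1)) acc hval
        rw [this]
        have hceq : ((c.toNat : Int) - 1) = c - 1 := by omega
        rw [hceq]

-- ===== VERDICT (by name: the statement is the Claim_ definition above) =====
theorem plakati_spec : Claim_equal_plakati := by
  intro x v d hdom hpre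
  obtain ⟨hlen, hne, hd, hs⟩ := hpre
  unfold Spec_plakati
  have hn : 0 < x.length := List.length_pos_iff.mpr hne
  have hrel := fold_rel x v d hs hd x.length 0 0 [] [] (by omega)
    ⟨rfl, rfl, fun k' h => absurd h (Nat.not_lt_zero k')⟩ (by simp)
  rw [List.drop_zero] at hrel
  obtain ⟨hslen, hdlen, hent⟩ := hrel
  simp only [plakati, plakati_alt]
  set sF := ((PySem.List.enumerate x).foldl (stepA x v d) (0, [])).2 with hsF
  set dpF := (PySem.List.enumerate x).foldl (stepB x v d) [] with hdpF
  have he := hent (x.length - 1) (by omega)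
  have hm : sF.length - 1 = x.length - 1 := by rw [hslen]
  have hmd : dpF.length - 1 = x.length - 1 := by rw [hdlen]
  rw [hm, hmd, he]
  have hcnt : cnt x d (x.length - 1) ≤ x.length - 1 := cnt_le x d hs hd _ (by omega)
  -- unfold the first iteration of B's while loop
  have hone : walkB x v dpF d (x.length + 1) ((x.length : Int) - 1) [] =
      walkB x v dpF d x.length
        (if bdef x v dpF d (x.length - 1) then (cnt x d (x.length - 1) : Int) - 1
         else ((x.length : Int) - 1) - 1)
        (if bdef x v dpF d (x.length - 1) then [(x.length : Int) - 1] else []) := by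
    simp only [walkB, if_pos (show (0:Int) ≤ (x.length : Int) - 1 by omega)]
    have ht : ((x.length : Int) - 1).toNat = x.length - 1 := by omega
    rw [ht, bisectR_cnt x d hs]
    rw [show v.getD (x.length - 1) 0 +
          (if 0 < cnt x d (x.length - 1) then dpF.getD (cnt x d (x.length - 1) - 1) 0 else 0)
          = placeD x v dpF d (x.length - 1) from rfl]
    by_cases hb : bdef x v dpF d (x.length - 1) = true
    · have hcond : (x.length : Int) - 1 = 0 ∨
          dpF.getD (x.length - 1 - 1) 0 ≤ placeD x v dpF d (x.length - 1) := by
        unfold bdef at hb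
        simp only [Bool.not_eq_true', decide_eq_false_iff_not] at hb
        by_cases hz : x.length - 1 = 0
        · left; omega
        · right
          by_contra hlt
          exact hb ⟨by omega, by omega⟩
      rw [if_pos hcond, hb]
      simp
    · have hbf : bdef x v dpF d (x.length - 1) = false := by
        cases hbb : bdef x v dpF d (x.length - 1)
        · rfl
        · exact absurd hbb hb
      have hhyp : 0 < x.length - 1 ∧
          placeD x v dpF d (x.length - 1) < dpF.getD (x.length - 1 - 1) 0 := by
        unfold bdef at hbf
        simp only [Bool.not_eq_false', decide_eq_true_eq] at hbf
        exact hbf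
      have hcond : ¬ ((x.length : Int) - 1 = 0 ∨
          dpF.getD (x.length - 1 - 1) 0 ≤ placeD x v dpF d (x.length - 1)) := by
        rintro (h0 | hle)
        · omega
        · omega
      rw [if_neg hcond, hbf]
      simp
  rw [hone]
  -- relate the remaining walk
  have hwalk : walkA sF x.length (rdef x v dpF d (x.length - 1))
      (if bdef x v dpF d (x.length - 1) then [(x.length : Int) - 1] else [])
      = walkB x v dpF d x.length
        (if bdef x v dpF d (x.length - 1) then (cnt x d (x.length - 1) : Int) - 1
         else ((x.length : Int) - 1) - 1)
        (if bdef x v dpF d (x.length - 1) then [(x.length : Int) - 1] else []) := by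
    have hw := walk_rel x v d hs hd sF dpF ⟨hslen, hdlen, hent⟩ x.length
      (rdef x v dpF d (x.length - 1))
      (if bdef x v dpF d (x.length - 1) then [(x.length : Int) - 1] else [])
      (by
        intro c' hh
        unfold rdef at hh
        by_cases hb : bdef x v dpF d (x.length - 1) = true
        · rw [if_pos hb] at hh
          by_cases hz : cnt x d (x.length - 1) = 0
          · rw [if_pos hz] at hh; cases hh
          · rw [if_neg hz] at hh; injection hh with hh; subst hh
            constructor
            · omega
            · have : ((cnt x d (x.length - 1) : Int) - 1).toNat
                  = cnt x d (x.length - 1) - 1 := by omega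
              omega
        · rw [if_neg hb] at hh
          injection hh with hh; subst hh
          have hbf : bdef x v dpF d (x.length - 1) = false := by
            cases hbb : bdef x v dpF d (x.length - 1)
            · rfl
            · exact absurd hbb hb
          have hhyp : 0 < x.length - 1 ∧ placeD x v dpF d (x.length - 1)
              < dpF.getD (x.length - 1 - 1) 0 := by
            unfold bdef at hbf
            simp only [Bool.not_eq_false', decide_eq_true_eq] at hbf
            exact hbf
          constructor
          · omega
          · have : (((x.length - 1 : Nat) : Int) - 1).toNat = x.length - 1 - 1 := by omega
            omega)
    rw [hw]
    congr 1
    unfold rdef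
    by_cases hb : bdef x v dpF d (x.length - 1) = true
    · rw [if_pos hb, if_pos hb]
      by_cases hz : cnt x d (x.length - 1) = 0
      · rw [if_pos hz, hz]; simp
      · rw [if_neg hz]
    · have hbf : bdef x v dpF d (x.length - 1) = false := by
        cases hbb : bdef x v dpF d (x.length - 1)
        · rfl
        · exact absurd hbb hb
      rw [hbf]
      simp only [Bool.false_eq_true, if_false]
      have hhyp : 0 < x.length - 1 ∧ placeD x v dpF d (x.length - 1)
          < dpF.getD (x.length - 1 - 1) 0 := by
        unfold bdef at hbf
        simp only [Bool.not_eq_false', decide_eq_true_eq] at hbf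
        exact hbf
      omega
  rw [← hwalk]
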